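-- pv_equiv track=rewrite | github.com/esoucy19/aoc | 2015/python/day11/day11.py | rule3
-- ===== SOURCE A (Python) =====
-- def rule3(string: str) -> bool:
--     pairs = set()
--     npairs = 0
--     for idx in range(len(string) - 1):
--         cur = string[idx]
--         nxt = string[idx + 1]
--         if cur == nxt and cur not in pairs:
--             pairs.add(cur)
--             npairs += 1
--             if npairs >= 2:
--                 break
--     return npairs >= 2
-- ===== SOURCE B (Python) =====
-- def rule3(string: str) -> bool:
--     return sum(c + c in string for c in set(string)) >= 2
-- ===== Notes on version B (the rewrite author's own statement) =====
-- stated objective: idiomatic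
-- what changed: Replaces the index scan with a running set and early break by a one-line count over the string's distinct characters of whether the doubled substring c+c occurs, via substring membership.
import Mathlib
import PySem

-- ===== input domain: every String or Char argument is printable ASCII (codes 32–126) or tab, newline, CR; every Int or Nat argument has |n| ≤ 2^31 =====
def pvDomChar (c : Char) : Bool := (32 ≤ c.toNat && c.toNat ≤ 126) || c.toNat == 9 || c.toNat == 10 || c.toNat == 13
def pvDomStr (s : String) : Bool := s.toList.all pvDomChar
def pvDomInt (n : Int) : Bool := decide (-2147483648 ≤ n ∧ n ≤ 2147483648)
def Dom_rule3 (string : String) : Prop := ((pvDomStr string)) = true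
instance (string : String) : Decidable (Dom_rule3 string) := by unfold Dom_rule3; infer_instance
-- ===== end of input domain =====

-- B replaces A's index scan with a running set and early break by counting, over the
-- string's distinct characters, those whose doubled two-character substring occurs (idiomatic rewrite).


-- ===== PORT A =====
-- the for-loop over range(len(string)-1) with state (pairs, npairs) and the break at npairs >= 2;
-- string[idx] / string[idx+1] ported via pyGetD (every index drawn from the range is in bounds, so
-- the default is never read and the port is exact)
def rule3Go (cs : List Char) : List Int → PySem.Set Char → Int → Int
  | [], _, npairs => npairs
  | idx :: rest, pairs, npairs =>
    let cur := PySem.List.pyGetD cs idx ' '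
    let nxt := PySem.List.pyGetD cs (idx + 1) ' '
    if cur == nxt && !(PySem.Set.contains pairs cur) then
      let pairs' := PySem.Set.add pairs cur
      let npairs' := npairs + 1
      if 2 ≤ npairs' then npairs' else rule3Go cs rest pairs' npairs'
    else rule3Go cs rest pairs npairs

def rule3 (string : String) : Bool :=
  let cs := string.toList
  decide (2 ≤ rule3Go cs (PySem.List.pyRange 0 ((cs.length : Int) - 1) 1) PySem.Set.empty 0)

-- ===== PORT B =====
-- sum(c + c in string for c in set(string)) >= 2  (a sum of 0/1 over the set: order-independent)
def rule3_alt (string : String) : Bool :=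
  let cs := string.toList
  decide (2 ≤ ((PySem.Set.ofList cs).map
    (fun c => if PySem.Chars.isIn [c, c] cs then (1 : Int) else 0)).sum)

-- ===== PRECONDITION & SPEC =====
def Spec_rule3 (string : String) (out : Bool) : Prop := out = rule3_alt string
instance (string : String) (out : Bool) : Decidable (Spec_rule3 string out) := by unfold Spec_rule3; infer_instance

-- ===== CLAIM (what is proved, stated in full; the proofs are below) =====
def Claim_equal_rule3 : Prop := ∀ (string : String), Dom_rule3 string → Spec_rule3 string (rule3 string)

-- ===== LEMMAS AND PROOFS =====
def Dbl (c : Char) (l : List Char) : Prop := [c, c] <:+: l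
def adjGo : List Char → PySem.Set Char → Int → Int
  | a :: b :: t, pairs, npairs =>
    if a == b && !(PySem.Set.contains pairs a) then
      if 2 ≤ npairs + 1 then npairs + 1 else adjGo (b :: t) (PySem.Set.add pairs a) (npairs + 1)
    else adjGo (b :: t) pairs npairs
  | _, _, npairs => npairs
lemma dbl_not_short {c : Char} {l : List Char} (h : l.length ≤ 1) : ¬ Dbl c l := by
  intro hd; have := hd.length_le; simp at this; omega
lemma prefix_double {c a b : Char} {t : List Char} :
    [c, c] <+: a :: b :: t ↔ c = a ∧ c = b := by simp [List.cons_prefix_cons]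
lemma dbl_cons_of_ne {c a : Char} {l : List Char} (h : c ≠ a) :
    Dbl c (a :: l) ↔ Dbl c l := by
  unfold Dbl; rw [List.infix_cons_iff]
  constructor
  · rintro (hp | hi)
    · exact absurd (List.cons_prefix_cons.mp hp).1 h
    · exact hi
  · exact Or.inr
lemma dbl_step {c a b : Char} {t : List Char} {pairs : PySem.Set Char}
    (h : a ≠ b ∨ a ∈ pairs) (hc : c ∉ pairs) :
    Dbl c (a :: b :: t) ↔ Dbl c (b :: t) := by
  by_cases hca : c = a
  · subst hca
    rcases h with h | h
    · unfold Dbl; rw [List.infix_cons_iff]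
      constructor
      · rintro (hp | hi)
        · exact absurd ((prefix_double.mp hp).1.symm.trans (prefix_double.mp hp).2) h
        · exact hi
      · exact Or.inr
    · exact absurd h hc
  · exact dbl_cons_of_ne hca

lemma adjGo_iff (cs : List Char) : ∀ (pairs : PySem.Set Char),
    (2 ≤ adjGo cs pairs 1 ↔ ∃ c, Dbl c cs ∧ c ∉ pairs) ∧
    (2 ≤ adjGo cs pairs 0 ↔ ∃ c d, c ≠ d ∧ Dbl c cs ∧ Dbl d cs ∧ c ∉ pairs ∧ d ∉ pairs) := by
  induction cs with
  | nil =>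
    intro pairs
    constructor
    · simp only [adjGo]
      constructor
      · omega
      · rintro ⟨c, hd, -⟩; exact absurd hd (dbl_not_short (by simp))
    · simp only [adjGo]
      constructor
      · omega
      · rintro ⟨c, d, -, hd, -⟩; exact absurd hd (dbl_not_short (by simp))
  | cons a t IH =>
    cases t with
    | nil =>
      intro pairs
      constructor
      · simp only [adjGo]
        constructor
        · omega
        · rintro ⟨c, hd, -⟩; exact absurd hd (dbl_not_short (by simp))
      · simp only [adjGo]
        constructor
        · omega
        · rintro ⟨c, d, -, hd, -⟩; exact absurd hd (dbl_not_short (by simp))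
    | cons b t2 =>

      intro pairs
      have hstep : ∀ (c : Char), c ∉ pairs → (a ≠ b ∨ a ∈ pairs) →
          (Dbl c (a :: b :: t2) ↔ Dbl c (b :: t2)) := fun c hc h => dbl_step h hc
      by_cases hab : a = b
      · subst hab
        by_cases hmem : a ∈ pairs
        · have hb : (a == a && !(PySem.Set.contains pairs a)) = false := by
            simp [hmem]
          simp only [adjGo, hb, Bool.false_eq_true, if_false]
          refine ⟨((IH pairs).1).trans ?_, ((IH pairs).2).trans ?_⟩
          · constructor
            · rintro ⟨c, hd, hc⟩
              exact ⟨c, (hstep c hc (Or.inr hmem)).mpr hd, hc⟩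
            · rintro ⟨c, hd, hc⟩
              exact ⟨c, (hstep c hc (Or.inr hmem)).mp hd, hc⟩
          · constructor
            · rintro ⟨c, d, hne, hdc, hdd, hc, hd⟩
              exact ⟨c, d, hne, (hstep c hc (Or.inr hmem)).mpr hdc,
                (hstep d hd (Or.inr hmem)).mpr hdd, hc, hd⟩
            · rintro ⟨c, d, hne, hdc, hdd, hc, hd⟩
              exact ⟨c, d, hne, (hstep c hc (Or.inr hmem)).mp hdc,
                (hstep d hd (Or.inr hmem)).mp hdd, hc, hd⟩
        · have hb : (a == a && !(PySem.Set.contains pairs a)) = true := by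
            simp [hmem]
          have hdbla : Dbl a (a :: a :: t2) := ⟨[], t2, rfl⟩
          simp only [adjGo, hb, if_true]
          constructor
          · rw [if_pos (by norm_num : (2:Int) ≤ 1 + 1)]
            constructor
            · intro _; exact ⟨a, hdbla, hmem⟩
            · intro _; norm_num
          · rw [if_neg (by norm_num : ¬ (2:Int) ≤ 0 + 1)]
            have h1 : (0:Int) + 1 = 1 := by norm_num
            rw [h1, (IH (PySem.Set.add pairs a)).1]
            constructor
            · rintro ⟨c, hd, hc⟩
              rw [PySem.Set.mem_add] at hc
              push Not at hc
              refine ⟨a, c, fun h => hc.2 h.symm, hdbla, ?_, hmem, hc.1⟩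
              exact List.infix_cons_iff.mpr (Or.inr hd)
            · rintro ⟨c, d, hne, hdc, hdd, hc, hd⟩
              by_cases hca : c = a
              · subst hca
                refine ⟨d, (dbl_cons_of_ne (fun h => hne h.symm)).mp hdd, ?_⟩
                rw [PySem.Set.mem_add]
                push Not
                exact ⟨hd, fun h => hne h.symm⟩
              · refine ⟨c, (dbl_cons_of_ne hca).mp hdc, ?_⟩
                rw [PySem.Set.mem_add]
                push Not
                exact ⟨hc, hca⟩
      · have hb : (a == b && !(PySem.Set.contains pairs a)) = false := by
          simp [hab]
        simp only [adjGo, hb, Bool.false_eq_true, if_false]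
        refine ⟨((IH pairs).1).trans ?_, ((IH pairs).2).trans ?_⟩
        · constructor
          · rintro ⟨c, hd, hc⟩
            exact ⟨c, (hstep c hc (Or.inl hab)).mpr hd, hc⟩
          · rintro ⟨c, hd, hc⟩
            exact ⟨c, (hstep c hc (Or.inl hab)).mp hd, hc⟩
        · constructor
          · rintro ⟨c, d, hne, hdc, hdd, hc, hd⟩
            exact ⟨c, d, hne, (hstep c hc (Or.inl hab)).mpr hdc,
              (hstep d hd (Or.inl hab)).mpr hdd, hc, hd⟩
          · rintro ⟨c, d, hne, hdc, hdd, hc, hd⟩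
            exact ⟨c, d, hne, (hstep c hc (Or.inl hab)).mp hdc,
              (hstep d hd (Or.inl hab)).mp hdd, hc, hd⟩


lemma adjGo_short (l : List Char) (pairs : PySem.Set Char) (n : Int) (h : l.length ≤ 1) :
    adjGo l pairs n = n := by
  match l with
  | [] => rfl
  | [a] => rfl
  | a :: b :: t => simp at h

lemma bridge (cs : List Char) : ∀ (k i : Nat) (pairs : PySem.Set Char) (n : Int),
    cs.length - 1 - i ≤ k →
    rule3Go cs (PySem.List.pyRange (i : Int) ((cs.length : Int) - 1) 1) pairs n
      = adjGo (cs.drop i) pairs n := by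
  intro k
  induction k with
  | zero =>
    intro i pairs n hk
    have hge : cs.length ≤ i + 1 := by omega
    have h1 : PySem.List.pyRange (i : Int) ((cs.length : Int) - 1) 1 = [] := by
      simp [PySem.List.pyRange]
      omega
    rw [h1, adjGo_short _ _ _ (by simp; omega)]
    rfl
  | succ k IHk =>
    intro i pairs n hk
    by_cases hlt : i + 1 < cs.length
    · have hlt' : (i : Int) < (cs.length : Int) - 1 := by omega
      rw [PySem.List.pyRange_one_cons hlt']
      have hi1 : i < cs.length := by omega
      have hdrop : cs.drop i = cs[i] :: cs.drop (i + 1) := List.drop_eq_getElem_cons hi1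
      have hdrop2 : cs.drop (i + 1) = cs[i+1] :: cs.drop (i + 2) := List.drop_eq_getElem_cons hlt
      have hcur : PySem.List.pyGetD cs (i : Int) ' ' = cs[i] := by
        rw [PySem.List.pyGetD_natCast, List.getD_eq_getElem _ _ hi1]
      have hnxt : PySem.List.pyGetD cs ((i : Int) + 1) ' ' = cs[i+1] := by
        rw [show ((i : Int) + 1) = ((i + 1 : Nat) : Int) by push_cast; ring,
          PySem.List.pyGetD_natCast, List.getD_eq_getElem _ _ hlt]
      rw [hdrop, hdrop2]
      simp only [rule3Go, adjGo, hcur, hnxt]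
      have hIH := fun pairs n => IHk (i+1) pairs n (by omega)
      rw [hdrop2] at hIH
      split_ifs with h1 h2
      · rfl
      · rw [show ((i : Int) + 1) = ((i + 1 : Nat) : Int) by push_cast; ring, hIH]
      · rw [show ((i : Int) + 1) = ((i + 1 : Nat) : Int) by push_cast; ring, hIH]
    · have h1 : PySem.List.pyRange (i : Int) ((cs.length : Int) - 1) 1 = [] := by
        simp [PySem.List.pyRange]
        omega
      rw [h1, adjGo_short _ _ _ (by simp; omega)]
      rfl

lemma two_le_countP_iff (l : List Char) (p : Char → Bool) (hnd : l.Nodup) :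
    2 ≤ l.countP p ↔ ∃ c d, c ≠ d ∧ c ∈ l ∧ d ∈ l ∧ p c = true ∧ p d = true := by
  rw [List.countP_eq_length_filter]
  constructor
  · intro h
    have hnd' := hnd.filter p
    match hm : l.filter p with
    | [] => rw [hm] at h; simp at h
    | [x] => rw [hm] at h; simp at h
    | x :: y :: r =>
      have hx : x ∈ l.filter p := by rw [hm]; simp
      have hy : y ∈ l.filter p := by rw [hm]; simp
      rw [List.mem_filter] at hx hy
      rw [hm] at hnd'
      have hxy : x ≠ y := by
        intro he; subst he
        exact (List.nodup_cons.mp hnd').1 (by simp)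
      exact ⟨x, y, hxy, hx.1, hy.1, hx.2, hy.2⟩
  · rintro ⟨c, d, hne, hc, hd, hpc, hpd⟩
    have hcf : c ∈ l.filter p := List.mem_filter.2 ⟨hc, hpc⟩
    have hdf : d ∈ l.filter p := List.mem_filter.2 ⟨hd, hpd⟩
    have h1 : d ∈ (l.filter p).erase c := (List.mem_erase_of_ne (Ne.symm hne)).2 hdf
    have h2 : 0 < ((l.filter p).erase c).length := List.length_pos_of_mem h1
    have h3 : ((l.filter p).erase c).length = (l.filter p).length - 1 :=
      List.length_erase_of_mem hcf
    omega

lemma dbl_mem {c : Char} {l : List Char} (h : Dbl c l) : c ∈ l :=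
  h.subset (by simp)

-- ===== VERDICT (by name: the statement is the Claim_ definition above) =====
theorem rule3_spec : Claim_equal_rule3 := by
  intro s _
  unfold Spec_rule3 rule3 rule3_alt
  simp only []
  rw [decide_eq_decide]
  have hb := bridge s.toList s.toList.length 0 PySem.Set.empty 0 (by omega)
  simp only [Nat.cast_zero, List.drop_zero] at hb
  rw [hb, (adjGo_iff s.toList PySem.Set.empty).2]
  rw [PySem.List.sum_map_ite_one_zero]
  have hcast : ∀ n : Nat, ((2 : Int) ≤ (n : Int)) ↔ 2 ≤ n := by
    intro n; exact_mod_cast Iff.rfl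
  rw [hcast, two_le_countP_iff _ _ (PySem.Set.nodup_ofList _)]
  constructor
  · rintro ⟨c, d, hne, hdc, hdd, -, -⟩
    exact ⟨c, d, hne, (PySem.Set.mem_ofList _ _).mpr (dbl_mem hdc),
      (PySem.Set.mem_ofList _ _).mpr (dbl_mem hdd),
      (PySem.Chars.isIn_iff_infix _ _).mpr hdc, (PySem.Chars.isIn_iff_infix _ _).mpr hdd⟩
  · rintro ⟨c, d, hne, -, -, hpc, hpd⟩
    exact ⟨c, d, hne, (PySem.Chars.isIn_iff_infix _ _).mp hpc,
      (PySem.Chars.isIn_iff_infix _ _).mp hpd,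
      by simp [PySem.Set.empty], by simp [PySem.Set.empty]⟩
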